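-- pv_equiv track=rewrite | github.com/digifella/Cortex | docker/cortex_engine/ingest_cortex.py | _detect_marker_credibility_value
-- ===== SOURCE A (Python) =====
-- def _detect_marker_credibility_value(file_path: str, text: str) -> int:
--     """Find credibility tier from marker matches (priority 5->1)."""
--     haystack = f"{file_path}\n{text}".lower()
--     marker_map = {
--         5: ["pubmed", "nlm", "nature", "lancet", "jama", "bmj", "peer-reviewed", "peer reviewed"],
--         4: ["who", "un ", "ipcc", "oecd", "world bank", "government", "department", "ministry", "university", "institute", "centre", "center"],
--         3: ["arxiv", "ssrn", "biorxiv", "researchgate", "preprint", "pre-print"],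
--         2: ["scientific american", "the conversation", "hbr", "harvard business review", "editorial"],
--         1: ["blog", "newsletter", "opinion", "consulting report", "whitepaper", "white paper"],
--     }
--     for tier in (5, 4, 3, 2, 1):
--         if any(marker in haystack for marker in marker_map[tier]):
--             return tier
--     return 0
-- ===== SOURCE B (Python) =====
-- # Flat reverse index marker -> tier; result = max matching tier in one pass (no priority-ordered early return).
-- _MARKER_INDEX = [
--     (marker, tier)
--     for tier, markers in {
--         5: ["pubmed", "nlm", "nature", "lancet", "jama", "bmj", "peer-reviewed", "peer reviewed"],
--         4: ["who", "un ", "ipcc", "oecd", "world bank", "government", "department", "ministry", "university", "institute", "centre", "center"],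
--         3: ["arxiv", "ssrn", "biorxiv", "researchgate", "preprint", "pre-print"],
--         2: ["scientific american", "the conversation", "hbr", "harvard business review", "editorial"],
--         1: ["blog", "newsletter", "opinion", "consulting report", "whitepaper", "white paper"],
--     }.items()
--     for marker in markers
-- ]
--
--
-- def _detect_marker_credibility_value(file_path: str, text: str) -> int:
--     """Find credibility tier as the max tier over a flat marker->tier index."""
--     haystack = f"{file_path}\n{text}".lower()
--     return max((tier for marker, tier in _MARKER_INDEX if marker in haystack), default=0)
-- ===== Notes on version B (the rewrite author's own statement) =====
-- stated objective: alternative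
-- what changed: Replaced the priority-ordered loop over tiers with early return by a flat marker->tier reverse index scanned once, taking the max of all matching tiers (default 0).
import Mathlib
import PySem

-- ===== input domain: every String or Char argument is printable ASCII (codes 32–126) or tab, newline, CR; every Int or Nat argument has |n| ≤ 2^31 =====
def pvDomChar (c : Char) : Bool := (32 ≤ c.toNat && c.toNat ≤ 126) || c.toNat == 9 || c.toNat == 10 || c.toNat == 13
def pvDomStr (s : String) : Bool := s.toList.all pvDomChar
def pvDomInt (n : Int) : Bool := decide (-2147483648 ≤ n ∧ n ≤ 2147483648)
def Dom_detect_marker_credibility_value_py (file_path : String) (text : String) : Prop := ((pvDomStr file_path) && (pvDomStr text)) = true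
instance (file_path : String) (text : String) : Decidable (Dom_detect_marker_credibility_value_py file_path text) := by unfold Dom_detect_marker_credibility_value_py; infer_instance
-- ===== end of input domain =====

-- B replaces A's priority-ordered tier loop (early return) by a flat marker->tier index scanned once, taking the max matching tier; same cost, different decomposition.


-- shared literal marker lists (pure data, used by both ports)
def pvM5 : List String := ["pubmed", "nlm", "nature", "lancet", "jama", "bmj", "peer-reviewed", "peer reviewed"]
def pvM4 : List String := ["who", "un ", "ipcc", "oecd", "world bank", "government", "department", "ministry", "university", "institute", "centre", "center"]
def pvM3 : List String := ["arxiv", "ssrn", "biorxiv", "researchgate", "preprint", "pre-print"]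
def pvM2 : List String := ["scientific american", "the conversation", "hbr", "harvard business review", "editorial"]
def pvM1 : List String := ["blog", "newsletter", "opinion", "consulting report", "whitepaper", "white paper"]

-- ===== PORT A =====
-- the dict literal  marker_map = {5: [...], ..., 1: [...]}
def pvMarkerMap : PySem.Dict Int (List String) :=
  ((((PySem.Dict.empty.insert 5 pvM5).insert 4 pvM4).insert 3 pvM3).insert 2 pvM2).insert 1 pvM1

-- the 'for tier in (5,4,3,2,1): if any(...): return tier' loop; falls through to 0
def pvLoopA (haystack : String) : List Int → Int
  | [] => 0
  | t :: ts =>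
      if (pvMarkerMap.getD t []).any (fun marker => PySem.Str.isIn marker haystack) then t
      else pvLoopA haystack ts

def detect_marker_credibility_value_py (file_path : String) (text : String) : Int :=
  let haystack := PySem.Str.lower (file_path ++ "\n" ++ text)
  pvLoopA haystack [5, 4, 3, 2, 1]

-- ===== PORT B =====
-- flat reverse index [(marker, tier) for tier, markers in {...}.items() for marker in markers]
def pvMarkerIndex : List (String × Int) :=
  pvM5.map (fun m => (m, 5)) ++ pvM4.map (fun m => (m, 4)) ++ pvM3.map (fun m => (m, 3)) ++
  pvM2.map (fun m => (m, 2)) ++ pvM1.map (fun m => (m, 1))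

-- max((tier for marker, tier in index if marker in haystack), default=0) as a single fold
def detect_marker_credibility_value_py_alt (file_path : String) (text : String) : Int :=
  let haystack := PySem.Str.lower (file_path ++ "\n" ++ text)
  pvMarkerIndex.foldl (fun best p => if PySem.Str.isIn p.1 haystack then max best p.2 else best) 0

-- ===== PRECONDITION & SPEC =====
def Spec_detect_marker_credibility_value_py (file_path : String) (text : String) (out : Int) : Prop := out = detect_marker_credibility_value_py_alt file_path text
instance (file_path : String) (text : String) (out : Int) : Decidable (Spec_detect_marker_credibility_value_py file_path text out) := by unfold Spec_detect_marker_credibility_value_py; infer_instance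

-- ===== CLAIM (what is proved, stated in full; the proofs are below) =====
def Claim_equal_detect_marker_credibility_value_py : Prop := ∀ (file_path : String) (text : String), Dom_detect_marker_credibility_value_py file_path text → Spec_detect_marker_credibility_value_py file_path text (detect_marker_credibility_value_py file_path text)

-- ===== LEMMAS AND PROOFS =====

-- folding max over one tier's block of the index = 'if any marker of the tier matches, max in the tier'
theorem pv_foldl_tier (s : String) (ms : List String) (t acc : Int) :
    (ms.map (fun m => (m, t))).foldl
        (fun best p => if PySem.Str.isIn p.1 s then max best p.2 else best) acc
    = if ms.any (fun m => PySem.Str.isIn m s) then max acc t else acc := by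
  induction ms generalizing acc with
  | nil => simp
  | cons m ms ih =>
    simp only [List.map_cons, List.foldl_cons, List.any_cons]
    rw [ih]
    rcases Bool.eq_false_or_eq_true (PySem.Str.isIn m s) with h | h <;>
      simp only [h, Bool.false_or, Bool.true_or, if_false, if_true, ite_true, ite_false] <;>
      split_ifs <;> simp_all [max_assoc]

theorem detect_marker_credibility_value_py_eq (file_path text : String) :
    detect_marker_credibility_value_py file_path text
      = detect_marker_credibility_value_py_alt file_path text := by
  unfold detect_marker_credibility_value_py detect_marker_credibility_value_py_alt pvMarkerIndex
  set hay := PySem.Str.lower (file_path ++ "\n" ++ text) with hhay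
  simp only [List.foldl_append, pv_foldl_tier]
  have h5 : pvMarkerMap.getD 5 [] = pvM5 := rfl
  have h4 : pvMarkerMap.getD 4 [] = pvM4 := rfl
  have h3 : pvMarkerMap.getD 3 [] = pvM3 := rfl
  have h2 : pvMarkerMap.getD 2 [] = pvM2 := rfl
  have h1 : pvMarkerMap.getD 1 [] = pvM1 := rfl
  simp only [pvLoopA, h5, h4, h3, h2, h1]
  cases pvM5.any (fun m => PySem.Str.isIn m hay) <;>
  cases pvM4.any (fun m => PySem.Str.isIn m hay) <;>
  cases pvM3.any (fun m => PySem.Str.isIn m hay) <;>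
  cases pvM2.any (fun m => PySem.Str.isIn m hay) <;>
  cases pvM1.any (fun m => PySem.Str.isIn m hay) <;> decide

-- ===== VERDICT (by name: the statement is the Claim_ definition above) =====
theorem detect_marker_credibility_value_py_spec : Claim_equal_detect_marker_credibility_value_py := by
  intro file_path text _
  exact detect_marker_credibility_value_py_eq file_path text
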